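-- pv_equiv track=rewrite | github.com/jerome-smith01/bible-memorization-app | The Bible Verse Memory App/src/formatters/verse_initializer.py | to_initials
-- ===== SOURCE A (Python) =====
-- def to_initials(verse_text: str) -> str:
--     """
--     Convert verse text to first initial of each word.
--     Preserves punctuation and case.
--
--     Args:
--         verse_text: Full verse text
--
--     Returns:
--         Formatted initials with punctuation
--     """
--     if not verse_text:
--         return ""
--
--     # Split by spaces while preserving punctuation attached to words
--     words = verse_text.split()
--     initials = []
--
--     for word in words:
--         if not word:
--             continue
--
--         # Separate leading punctuation from word
--         leading_punct = ""
--         trailing_punct = ""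
--         clean_word = word
--
--         # Extract leading punctuation (e.g., opening quotes, parentheses)
--         i = 0
--         while i < len(word) and not word[i].isalnum():
--             i += 1
--         leading_punct = word[:i]
--         clean_word = word[i:]
--
--         # Extract trailing punctuation (e.g., periods, commas, quotes)
--         j = len(clean_word) - 1
--         while j >= 0 and not clean_word[j].isalnum():
--             j -= 1
--         if j >= 0:
--             trailing_punct = clean_word[j + 1:]
--             clean_word = clean_word[:j + 1]
--         else:
--             # All punctuation
--             trailing_punct = clean_word
--             clean_word = ""
--
--         # Get first character if word exists
--         if clean_word:
--             initial = clean_word[0]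
--             initials.append(leading_punct + initial + trailing_punct)
--         elif leading_punct or trailing_punct:
--             # Preserve standalone punctuation
--             initials.append(leading_punct + trailing_punct)
--
--     return " ".join(initials)
-- ===== SOURCE B (Python) =====
-- def to_initials(verse_text: str) -> str:
--     parts = []
--     for word in verse_text.split():
--         idxs = [i for i, ch in enumerate(word) if ch.isalnum()]
--         if not idxs:
--             parts.append(word)
--         else:
--             parts.append(word[: idxs[0] + 1] + word[idxs[-1] + 1 :])
--     return " ".join(parts)
-- ===== Notes on version B (the rewrite author's own statement) =====
-- stated objective: simpler
-- what changed: Instead of A's two index-advancing while loops that cut each word into leading/clean/trailing pieces and reassemble them through a three-way branch, B collects the alphanumeric positions of each word once with a comprehension and emits word[:first+1] + word[last+1:] (or the word unchanged when there are none).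
import Mathlib
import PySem

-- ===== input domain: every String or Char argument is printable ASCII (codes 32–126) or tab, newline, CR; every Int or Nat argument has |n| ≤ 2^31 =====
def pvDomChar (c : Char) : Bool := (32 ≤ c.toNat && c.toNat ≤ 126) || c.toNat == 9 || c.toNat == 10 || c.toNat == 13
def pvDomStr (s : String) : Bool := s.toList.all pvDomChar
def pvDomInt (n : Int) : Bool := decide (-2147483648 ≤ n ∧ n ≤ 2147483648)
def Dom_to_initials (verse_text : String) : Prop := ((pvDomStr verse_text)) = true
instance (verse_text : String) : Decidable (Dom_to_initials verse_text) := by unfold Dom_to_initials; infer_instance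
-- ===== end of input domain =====

-- B replaces A's two index-advancing while loops and three-way reassembly per word by one
-- comprehension of the alphanumeric positions and two slices (objective: simpler).

-- ===== PORT A =====
-- A's index-advancing while loop 'while i < len(s) and not s[i].isalnum(): i += 1'
-- (started at an end of the string): returns the number of characters it skipped (the final i).
def scanNonAlnum : List Char → Nat
  | [] => 0
  | c :: t => if PySem.Chars.isalnum c then 0 else scanNonAlnum t + 1

def to_initials (verse_text : String) : String :=
  if verse_text = "" then ""
  else
    let words := PySem.Chars.split₀ verse_text.toList
    let initials := words.foldl (fun acc word =>
      if word = [] then acc   -- 'if not word: continue'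
      else
        let i := scanNonAlnum word                                  -- first while loop's final i
        let leading := PySem.List.slice word none (some (i : Int))  -- word[:i]
        let clean := PySem.List.slice word (some (i : Int)) none    -- word[i:]
        -- second while loop runs j from the end; it skips k chars, ending at j = clean.length-1-k
        let k := scanNonAlnum clean.reverse
        let trailing := if k < clean.length
          then PySem.List.slice clean (some ((clean.length - k : Nat) : Int)) none   -- clean[j+1:]
          else clean
        let clean := if k < clean.length
          then PySem.List.slice clean none (some ((clean.length - k : Nat) : Int))   -- clean[:j+1]
          else []
        match clean with
        | c :: _ => acc ++ [leading ++ [c] ++ trailing]             -- initial = clean_word[0]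
        | [] => if leading ≠ [] ∨ trailing ≠ [] then acc ++ [leading ++ trailing] else acc
      ) []
    String.ofList (PySem.Chars.join [' '] initials)

-- ===== PORT B =====
def bWord (word : List Char) : List Char :=
  let idxs := ((PySem.List.enumerate word).filter (fun p => PySem.Chars.isalnum p.2)).map Prod.fst
  match idxs with
  | [] => word
  | f :: _ =>
      PySem.List.slice word none (some (f + 1)) ++
      PySem.List.slice word (some (idxs.getLast! + 1)) none

def to_initials_alt (verse_text : String) : String :=
  String.ofList (PySem.Chars.join [' '] ((PySem.Chars.split₀ verse_text.toList).map bWord))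

-- ===== PRECONDITION & SPEC =====
def Spec_to_initials (verse_text : String) (out : String) : Prop := out = to_initials_alt verse_text
instance (verse_text : String) (out : String) : Decidable (Spec_to_initials verse_text out) := by unfold Spec_to_initials; infer_instance

-- ===== CLAIM (what is proved, stated in full; the proofs are below) =====
def Claim_equal_to_initials : Prop := ∀ (verse_text : String), Dom_to_initials verse_text → Spec_to_initials verse_text (to_initials verse_text)

-- ===== LEMMAS AND PROOFS =====

-- words produced by split₀ are nonempty
theorem split₀_go_ne_nil (s : List Char) : ∀ (cur : List Char) (acc : List (List Char)),
    (∀ w ∈ acc, w ≠ []) → ∀ w ∈ PySem.Chars.split₀.go s cur acc, w ≠ [] := by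
  induction s with
  | nil =>
      intro cur acc hacc w hw
      unfold PySem.Chars.split₀.go at hw
      split at hw
      · exact hacc w (List.mem_reverse.1 hw)
      · next hne =>
          rcases List.mem_cons.1 (List.mem_reverse.1 hw) with h | h
          · subst h; simp [List.isEmpty_iff] at hne ⊢; simpa using hne
          · exact hacc w h
  | cons c rest ih =>
      intro cur acc hacc w hw
      unfold PySem.Chars.split₀.go at hw
      split at hw
      · split at hw
        · exact ih [] acc hacc w hw
        · next hne =>
            refine ih [] _ ?_ w hw
            intro v hv
            rcases List.mem_cons.1 hv with h | h
            · subst h; simp [List.isEmpty_iff] at hne ⊢; simpa using hne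
            · exact hacc v h
      · exact ih (c :: cur) acc hacc w hw

theorem split₀_ne_nil (s : List Char) : ∀ w ∈ PySem.Chars.split₀ s, w ≠ [] := by
  intro w hw
  exact split₀_go_ne_nil s [] [] (by simp) w hw

theorem scanNonAlnum_eq (w : List Char) :
    scanNonAlnum w = (w.takeWhile (fun c => !PySem.Chars.isalnum c)).length := by
  induction w with
  | nil => rfl
  | cons c t ih =>
      by_cases h : PySem.Chars.isalnum c
      · simp [scanNonAlnum, h]
      · simp [scanNonAlnum, h, ih]

-- takeWhile over an append stops in the first part if that part has a failing element
theorem takeWhile_append_of_exists {α : Type} (P : α → Bool) (a b : List α)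
    (h : ∃ x ∈ a, P x = false) : (a ++ b).takeWhile P = a.takeWhile P := by
  induction a with
  | nil => rcases h with ⟨x, hx, _⟩; cases hx
  | cons c a' ih =>
      by_cases hc : P c
      · simp only [List.cons_append, List.takeWhile_cons, hc]
        rcases h with ⟨x, hx, hPx⟩
        rcases List.mem_cons.1 hx with h' | h'
        · subst h'; simp [hc] at hPx
        · rw [ih ⟨x, h', hPx⟩]
      · simp [hc]

theorem length_takeWhile_lt_of_exists {α : Type} (P : α → Bool) (a : List α)
    (h : ∃ x ∈ a, P x = false) : (a.takeWhile P).length < a.length := by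
  rcases h with ⟨x, hx, hPx⟩
  have hne : a.takeWhile P ≠ a := by
    intro he
    have : P x = true := List.mem_takeWhile_imp (he ▸ hx)
    simp [hPx] at this
  have hle : (a.takeWhile P).length ≤ a.length := (List.takeWhile_prefix P).length_le
  rcases lt_or_eq_of_le hle with h' | h'
  · exact h'
  · exact absurd ((List.takeWhile_prefix P).eq_of_length h') hne

-- the alnum-index list of B, with general start (for induction)
def alIdxs (w : List Char) (s : Int) : List Int :=
  ((PySem.List.enumerate w s).filter (fun p => PySem.Chars.isalnum p.2)).map Prod.fst

theorem alIdxs_cons (c : Char) (t : List Char) (s : Int) :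
    alIdxs (c :: t) s = (if PySem.Chars.isalnum c then [s] else []) ++ alIdxs t (s + 1) := by
  by_cases h : PySem.Chars.isalnum c <;>
    simp [alIdxs, PySem.List.enumerate_cons, h]

theorem alIdxs_nil_iff (w : List Char) (s : Int) :
    alIdxs w s = [] ↔ w.all (fun c => !PySem.Chars.isalnum c) := by
  induction w generalizing s with
  | nil => simp [alIdxs]
  | cons c t ih =>
      by_cases h : PySem.Chars.isalnum c <;>
        simp [alIdxs_cons, h, ih (s + 1)]

theorem alIdxs_head (w : List Char) (s : Int) (h : w.any PySem.Chars.isalnum) :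
    (alIdxs w s).head? = some (s + ((w.takeWhile (fun c => !PySem.Chars.isalnum c)).length : Int)) := by
  induction w generalizing s with
  | nil => simp at h
  | cons c t ih =>
      by_cases hc : PySem.Chars.isalnum c
      · simp [alIdxs_cons, hc]
      · have ht : t.any PySem.Chars.isalnum := by simpa [hc] using h
        rw [alIdxs_cons]
        have h1 : (if PySem.Chars.isalnum c then [s] else []) = ([] : List Int) := by simp [hc]
        have h2 : (c :: t).takeWhile (fun c => !PySem.Chars.isalnum c)
            = c :: t.takeWhile (fun c => !PySem.Chars.isalnum c) := by
          simp [hc]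
        rw [h1, List.nil_append, ih (s + 1) ht, h2, List.length_cons]
        congr 1
        push_cast
        ring
  
theorem alIdxs_append (a b : List Char) (s : Int) :
    alIdxs (a ++ b) s = alIdxs a s ++ alIdxs b (s + a.length) := by
  induction a generalizing s with
  | nil => simp [alIdxs]
  | cons c t ih =>
      simp only [List.cons_append, alIdxs_cons, ih (s + 1), List.length_cons]
      rw [List.append_assoc]
      congr 2
      push_cast
      ring_nf
  
theorem alIdxs_last (w : List Char) (s : Int) (h : w.any PySem.Chars.isalnum) :
    (alIdxs w s).getLast? =
      some (s + (w.length : Int) - 1 - ((w.reverse.takeWhile (fun c => !PySem.Chars.isalnum c)).length : Int)) := by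
  induction w using List.reverseRecOn generalizing s with
  | nil => simp at h
  | append_singleton t c ih =>
      rw [alIdxs_append]
      by_cases hc : PySem.Chars.isalnum c
      · simp [hc, alIdxs]
        ring
      · have ht : t.any PySem.Chars.isalnum := by
          rcases List.any_eq_true.1 h with ⟨x, hx, hPx⟩
          rcases List.mem_append.1 hx with h' | h'
          · exact List.any_eq_true.2 ⟨x, h', hPx⟩
          · simp at h'; subst h'; simp [hPx] at hc
        have hne : alIdxs t s ≠ [] := by
          intro he
          have := (alIdxs_nil_iff t s).1 he
          rcases List.any_eq_true.1 ht with ⟨x, hx, hPx⟩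
          have := List.all_eq_true.1 this x hx
          simp [hPx] at this
        have : alIdxs [c] (s + (t.length : Int)) = [] := by
          simp [hc, alIdxs]
        rw [this, List.append_nil, ih s ht]
        simp [hc]
        ring
  
-- A's loop body as a named function (definitionally the lambda in the port)
def aBody (acc : List (List Char)) (word : List Char) : List (List Char) :=
  if word = [] then acc
  else
    let i := scanNonAlnum word
    let leading := PySem.List.slice word none (some (i : Int))
    let clean := PySem.List.slice word (some (i : Int)) none
    let k := scanNonAlnum clean.reverse
    let trailing := if k < clean.length
      then PySem.List.slice clean (some ((clean.length - k : Nat) : Int)) none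
      else clean
    let clean := if k < clean.length
      then PySem.List.slice clean none (some ((clean.length - k : Nat) : Int))
      else []
    match clean with
    | c :: _ => acc ++ [leading ++ [c] ++ trailing]
    | [] => if leading ≠ [] ∨ trailing ≠ [] then acc ++ [leading ++ trailing] else acc

theorem bWord_def (w : List Char) : bWord w =
    (match alIdxs w 0 with
     | [] => w
     | f :: _ =>
         PySem.List.slice w none (some (f + 1)) ++
         PySem.List.slice w (some ((alIdxs w 0).getLast! + 1)) none) := rfl

theorem dropWhile_head_false {α : Type} (p : α → Bool) (l : List α) (d : α) (D' : List α)
    (h : l.dropWhile p = d :: D') : p d = false := by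
  induction l with
  | nil => simp at h
  | cons c t ih =>
      rw [List.dropWhile_cons] at h
      split at h
      · exact ih h
      · next hc => cases h; simpa using hc

-- the per-word equality: A's loop body appends exactly [bWord w] for a nonempty word
theorem piece_eq (acc : List (List Char)) (w : List Char) (hw : w ≠ []) :
    aBody acc w = acc ++ [bWord w] := by
  by_cases hAl : w.any PySem.Chars.isalnum
  · -- word contains an alphanumeric character
    have hTD : w.takeWhile (fun c => !PySem.Chars.isalnum c) ++
        w.dropWhile (fun c => !PySem.Chars.isalnum c) = w := List.takeWhile_append_dropWhile
    have hD : w.dropWhile (fun c => !PySem.Chars.isalnum c) ≠ [] := by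
      rw [Ne, List.dropWhile_eq_nil_iff]
      intro hall
      rcases List.any_eq_true.1 hAl with ⟨x, hx, hPx⟩
      have := hall x hx
      simp [hPx] at this
    obtain ⟨d, D', hDeq⟩ := List.exists_cons_of_ne_nil hD
    have hd : PySem.Chars.isalnum d = true := by
      have := dropWhile_head_false _ _ _ _ hDeq
      simpa using this
    have hdmemD : d ∈ w.dropWhile (fun c => !PySem.Chars.isalnum c) := by
      rw [hDeq]; exact List.mem_cons_self
    have hi : scanNonAlnum w = (w.takeWhile (fun c => !PySem.Chars.isalnum c)).length :=
      scanNonAlnum_eq w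
    have hlen : w.length = (w.takeWhile (fun c => !PySem.Chars.isalnum c)).length +
        (w.dropWhile (fun c => !PySem.Chars.isalnum c)).length := by
      have := congrArg List.length hTD
      rw [List.length_append] at this
      omega
    have h1 : PySem.List.slice w none (some ((scanNonAlnum w : Nat) : Int)) =
        w.takeWhile (fun c => !PySem.Chars.isalnum c) := by
      rw [hi, PySem.List.slice_to_natCast]
      conv_lhs => rw [← hTD]
      rw [List.take_append]
      simp
    have h2 : PySem.List.slice w (some ((scanNonAlnum w : Nat) : Int)) none =
        w.dropWhile (fun c => !PySem.Chars.isalnum c) := by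
      rw [hi, PySem.List.slice_from_natCast]
      conv_lhs => rw [← hTD]
      rw [List.drop_append]
      simp
    have hWrev : w.reverse.takeWhile (fun c => !PySem.Chars.isalnum c) =
        (w.dropWhile (fun c => !PySem.Chars.isalnum c)).reverse.takeWhile
          (fun c => !PySem.Chars.isalnum c) := by
      conv_lhs => rw [← hTD]
      rw [List.reverse_append]
      exact takeWhile_append_of_exists _ _ _ ⟨d, List.mem_reverse.2 hdmemD, by simp [hd]⟩
    have hk : scanNonAlnum (w.dropWhile (fun c => !PySem.Chars.isalnum c)).reverse =
        ((w.dropWhile (fun c => !PySem.Chars.isalnum c)).reverse.takeWhile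
          (fun c => !PySem.Chars.isalnum c)).length := scanNonAlnum_eq _
    have hk_lt : ((w.dropWhile (fun c => !PySem.Chars.isalnum c)).reverse.takeWhile
          (fun c => !PySem.Chars.isalnum c)).length <
        (w.dropWhile (fun c => !PySem.Chars.isalnum c)).length := by
      have := length_takeWhile_lt_of_exists (fun c => !PySem.Chars.isalnum c)
        (w.dropWhile (fun c => !PySem.Chars.isalnum c)).reverse
        ⟨d, List.mem_reverse.2 hdmemD, by simp [hd]⟩
      simpa using this
    -- abbreviations for the proof text
    generalize hT : w.takeWhile (fun c => !PySem.Chars.isalnum c) = T at *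
    generalize hDD : w.dropWhile (fun c => !PySem.Chars.isalnum c) = D at *
    generalize hK : (D.reverse.takeWhile (fun c => !PySem.Chars.isalnum c)).length = K at *
    -- B's side: the index list is nonempty, with head ↑T.length and last ↑w.length - 1 - ↑K
    have hhead : (alIdxs w 0).head? = some ((T.length : Int)) := by
      have := alIdxs_head w 0 hAl
      rw [hT] at this
      simpa using this
    have hlast : (alIdxs w 0).getLast? = some ((w.length : Int) - 1 - (K : Int)) := by
      have := alIdxs_last w 0 hAl
      rw [hWrev, hK] at this
      simpa using this
    cases e : alIdxs w 0 with
    | nil => rw [e] at hhead; simp at hhead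
    | cons f rest =>
      rw [e] at hhead
      have hf : f = (T.length : Int) := by simpa using hhead
      -- compute B's word
      have hB : bWord w = T ++ [d] ++ w.drop (w.length - K) := by
        rw [bWord_def, e]
        rw [e] at hlast
        dsimp only
        rw [List.getLast!_of_getLast? hlast]
        have e1 : f + 1 = ((T.length + 1 : Nat) : Int) := by rw [hf]; push_cast; ring
        have e2 : (w.length : Int) - 1 - (K : Int) + 1 = ((w.length - K : Nat) : Int) := by
          have hKle : K ≤ w.length := by omega
          push_cast [Nat.cast_sub hKle]
          ring
        rw [e1, e2, PySem.List.slice_to_natCast, PySem.List.slice_from_natCast]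
        have htake : w.take (T.length + 1) = T ++ [d] := by
          conv_lhs => rw [← hTD, hDeq]
          rw [List.take_append, List.take_of_length_le (by omega)]
          have : T.length + 1 - T.length = 1 := by omega
          rw [this]
          simp
        rw [htake]
      -- compute A's word
      unfold aBody
      rw [if_neg hw]
      dsimp only
      rw [h1, h2, hk, if_pos hk_lt, if_pos hk_lt,
          PySem.List.slice_to_natCast, PySem.List.slice_from_natCast]
      have hdropD : D.drop (D.length - K) = w.drop (w.length - K) := by
        conv_rhs => rw [← hTD]
        rw [List.drop_append]
        have e3 : List.drop ((T ++ D).length - K) T = [] :=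
          List.drop_eq_nil_of_le (by simp only [List.length_append]; omega)
        have e4 : (T ++ D).length - K - T.length = D.length - K := by
          simp only [List.length_append]
          omega
        rw [e3, e4, List.nil_append]
      obtain ⟨m, hm⟩ : ∃ m, D.length - K = m + 1 := ⟨D.length - K - 1, by omega⟩
      rw [hm, hDeq, List.take_succ_cons]
      rw [hB, ← hdropD, hm]
      simp [hDeq]
  · -- word is all punctuation: both sides keep it unchanged
    have hall : ∀ x ∈ w, PySem.Chars.isalnum x = false := by
      intro x hx
      by_contra hxx
      exact hAl (List.any_eq_true.2 ⟨x, hx, by simpa using hxx⟩)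
    have hT : w.takeWhile (fun c => !PySem.Chars.isalnum c) = w :=
      List.takeWhile_eq_self_iff.mpr (by intro x hx; simp [hall x hx])
    have hi : scanNonAlnum w = w.length := by rw [scanNonAlnum_eq, hT]
    have hB : bWord w = w := by
      rw [bWord_def, (alIdxs_nil_iff w 0).2 (List.all_eq_true.2 (by intro x hx; simp [hall x hx]))]
    unfold aBody
    rw [if_neg hw]
    dsimp only
    simp only [hi, PySem.List.slice_to_natCast, PySem.List.slice_from_natCast,
        List.take_length, List.drop_length]
    simp [scanNonAlnum, hB, hw]

theorem foldA_eq (ws : List (List Char)) (h : ∀ w ∈ ws, w ≠ []) :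
    ∀ acc, ws.foldl aBody acc = acc ++ ws.map bWord := by
  induction ws with
  | nil => simp
  | cons w t ih =>
      intro acc
      rw [List.foldl_cons, piece_eq acc w (h w List.mem_cons_self),
          ih (fun v hv => h v (List.mem_cons_of_mem w hv)) (acc ++ [bWord w])]
      simp

theorem to_initials_eq_lists (verse_text : String) :
    to_initials verse_text = to_initials_alt verse_text := by
  by_cases hs : verse_text = ""
  · subst hs; rfl
  · have h1 : to_initials verse_text = String.ofList (PySem.Chars.join [' ']
        ((PySem.Chars.split₀ verse_text.toList).foldl aBody [])) := by
      unfold to_initials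
      rw [if_neg hs]
      rfl
    rw [h1, foldA_eq _ (split₀_ne_nil _) [], List.nil_append]
    rfl

-- ===== VERDICT (by name: the statement is the Claim_ definition above) =====
theorem to_initials_spec : Claim_equal_to_initials := by
  intro s _
  unfold Spec_to_initials
  exact to_initials_eq_lists s
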